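-- pv_equiv track=rewrite | github.com/computbiolgeek/script_repo | renumber_pdb.py | create_id_mapping
-- ===== SOURCE A (Python) =====
-- def create_id_mapping(aligned_seq_a, aligned_seq_b, start_id=1):
--     """
--
--     Parameters
--     ----------
--     aligned_seq_a
--     aligned_seq_b
--     start_id
--
--     Returns
--     -------
--
--     """
--     id_mapping = {}
--     seq_a_id = start_id - 1
--     seq_b_id = 0
--     for x, y in zip(aligned_seq_a, aligned_seq_b):
--         if x != '-':
--             seq_a_id += 1
--         if y != '-':
--             seq_b_id += 1
--         if x != '-':
--             if y == '-':
--                 id_mapping[seq_a_id] = None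
--             else:
--                 id_mapping[seq_a_id] = seq_b_id
--     return id_mapping
-- ===== SOURCE B (Python) =====
-- def create_id_mapping(aligned_seq_a, aligned_seq_b, start_id=1):
--     # Pass 1: per-column residue id of sequence b (None where b has a gap),
--     # over the zip-truncated common length.
--     n = min(len(aligned_seq_a), len(aligned_seq_b))
--     b_ids = []
--     cnt = 0
--     for ch in aligned_seq_b[:n]:
--         if ch != '-':
--             cnt += 1
--             b_ids.append(cnt)
--         else:
--             b_ids.append(None)
--     # Pass 2: columns where a is non-gap get consecutive a-ids from start_id.
--     cols = [i for i in range(n) if aligned_seq_a[i] != '-']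
--     return {start_id + k: b_ids[i] for k, i in enumerate(cols)}
-- ===== Notes on version B (the rewrite author's own statement) =====
-- stated objective: alternative
-- what changed: Replaces the single stateful loop (two running counters and conditional dict insertion) by two passes: first build a per-column list of b residue ids (None at b-gaps) over the truncated length, then enumerate only the columns where a is non-gap and assign consecutive a-ids from start_id via a dict comprehension.
import Mathlib
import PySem

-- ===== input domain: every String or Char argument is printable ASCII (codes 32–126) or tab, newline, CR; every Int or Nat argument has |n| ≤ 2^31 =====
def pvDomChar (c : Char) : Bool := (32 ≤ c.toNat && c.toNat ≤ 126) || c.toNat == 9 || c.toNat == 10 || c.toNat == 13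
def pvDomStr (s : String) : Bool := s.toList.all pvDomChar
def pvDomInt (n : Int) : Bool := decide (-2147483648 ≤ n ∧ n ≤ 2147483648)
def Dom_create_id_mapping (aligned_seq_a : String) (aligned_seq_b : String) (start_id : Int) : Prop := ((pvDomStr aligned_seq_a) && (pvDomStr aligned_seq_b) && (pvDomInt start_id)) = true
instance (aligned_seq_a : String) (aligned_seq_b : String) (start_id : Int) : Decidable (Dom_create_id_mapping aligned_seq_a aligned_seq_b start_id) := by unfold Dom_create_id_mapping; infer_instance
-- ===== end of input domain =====

-- B replaces A's single stateful loop by two passes (per-column b-id index, then a filtered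
-- enumeration of a's non-gap columns); same O(n) cost, proved to return the same mapping.


-- ===== PORT A =====
-- loop body of A: the three assignments of one iteration (seq_a_id, seq_b_id, conditional insert)
def createStep (st : PySem.Dict Int (Option Int) × Int × Int) (xy : Char × Char) :
    PySem.Dict Int (Option Int) × Int × Int :=
  let sa := if xy.1 ≠ '-' then st.2.1 + 1 else st.2.1
  let sb := if xy.2 ≠ '-' then st.2.2 + 1 else st.2.2
  let d := if xy.1 ≠ '-' then
             (if xy.2 = '-' then st.1.insert sa none else st.1.insert sa (some sb))
           else st.1
  (d, sa, sb)

-- literal port of A: one fold over zip(a, b) carrying (dict, seq_a_id, seq_b_id)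
def create_id_mapping (aligned_seq_a : String) (aligned_seq_b : String) (start_id : Int) : List (Int × Option Int) :=
  (((aligned_seq_a.toList.zip aligned_seq_b.toList).foldl createStep
      (PySem.Dict.empty, start_id - 1, 0)).1).items

-- ===== PORT B =====
-- literal port of Source B: pass 1 builds b_ids over aligned_seq_b[:n] (take n, exact since 0 ≤ n ≤ len);
-- pass 2 filters range(n) on a[i] != '-' (getD exact since i < n ≤ len a); the dict comprehension's
-- keys start_id+k are strictly increasing hence fresh, so its insertion-order items are this map.
def create_id_mapping_alt (aligned_seq_a : String) (aligned_seq_b : String) (start_id : Int) : List (Int × Option Int) :=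
  let n := min aligned_seq_a.toList.length aligned_seq_b.toList.length
  let b_ids := ((aligned_seq_b.toList.take n).foldl
      (fun (st : List (Option Int) × Int) ch =>
        if ch ≠ '-' then (st.1 ++ [some (st.2 + 1)], st.2 + 1) else (st.1 ++ [none], st.2))
      ([], 0)).1
  let cols := (List.range n).filter (fun i => aligned_seq_a.toList.getD i ' ' != '-')
  (PySem.List.enumerate cols 0).map (fun ki => (start_id + ki.1, b_ids.getD ki.2 none))

-- ===== PRECONDITION & SPEC =====
def Spec_create_id_mapping (aligned_seq_a : String) (aligned_seq_b : String) (start_id : Int) (out : List (Int × Option Int)) : Prop := out = create_id_mapping_alt aligned_seq_a aligned_seq_b start_id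
instance (aligned_seq_a : String) (aligned_seq_b : String) (start_id : Int) (out : List (Int × Option Int)) : Decidable (Spec_create_id_mapping aligned_seq_a aligned_seq_b start_id out) := by unfold Spec_create_id_mapping; infer_instance

-- ===== CLAIM (what is proved, stated in full; the proofs are below) =====
def Claim_equal_create_id_mapping : Prop := ∀ (aligned_seq_a : String) (aligned_seq_b : String) (start_id : Int), Dom_create_id_mapping aligned_seq_a aligned_seq_b start_id → Spec_create_id_mapping aligned_seq_a aligned_seq_b start_id (create_id_mapping aligned_seq_a aligned_seq_b start_id)

-- ===== LEMMAS AND PROOFS =====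

-- common reference: the per-column mapping, nk = next a-id to assign, c = b residues seen so far
def specGo : List (Char × Char) → Int → Int → List (Int × Option Int)
  | [], _, _ => []
  | (x, y) :: rest, nk, c =>
    let c' := if y ≠ '-' then c + 1 else c
    if x ≠ '-' then (nk, if y = '-' then none else some c') :: specGo rest (nk + 1) c'
    else specGo rest nk c'

-- recursive form of B's first pass
def bidsRec : Int → List Char → List (Option Int)
  | _, [] => []
  | c, ch :: l => if ch ≠ '-' then some (c + 1) :: bidsRec (c + 1) l else none :: bidsRec c l

theorem bids_foldl (l : List Char) (st : List (Option Int) × Int) :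
    ((l.foldl
      (fun (st : List (Option Int) × Int) ch =>
        if ch ≠ '-' then (st.1 ++ [some (st.2 + 1)], st.2 + 1) else (st.1 ++ [none], st.2))
      st).1) = st.1 ++ bidsRec st.2 l := by
  induction l generalizing st with
  | nil => simp [bidsRec]
  | cons ch l ih =>
    rw [List.foldl_cons, ih]
    by_cases h : ch = '-' <;> simp [bidsRec, h]

theorem enumerate_shift {α : Type} (l : List α) (s : Int) :
    PySem.List.enumerate l s = (PySem.List.enumerate l 0).map (fun p => (p.1 + s, p.2)) := by
  induction l generalizing s with
  | nil => simp [PySem.List.enumerate_nil]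
  | cons x l ih =>
    rw [PySem.List.enumerate_cons, PySem.List.enumerate_cons, ih (s + 1), zero_add, ih 1]
    simp only [List.map_cons, List.map_map]
    congr 1
    · simp
    · apply List.map_congr_left; intro p _; simp [Function.comp]; omega

theorem enumerate_map_succ (l : List Nat) (s : Int) :
    PySem.List.enumerate (l.map Nat.succ) s = (PySem.List.enumerate l s).map (fun p => (p.1, p.2.succ)) := by
  induction l generalizing s with
  | nil => simp [PySem.List.enumerate_nil]
  | cons x l ih =>
    simp [PySem.List.enumerate_cons, ih]

-- B's assembled expression (on lists) equals specGo
theorem altGo_eq_spec (la lb : List Char) (start c : Int) :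
    ((PySem.List.enumerate ((List.range (min la.length lb.length)).filter
          (fun i => la.getD i ' ' != '-')) 0).map
      (fun ki => (start + ki.1, (bidsRec c (lb.take (min la.length lb.length))).getD ki.2 none)))
    = specGo (la.zip lb) start c := by
  induction la generalizing lb start c with
  | nil => simp [specGo, PySem.List.enumerate_nil]
  | cons x la ih =>
    cases lb with
    | nil => simp [specGo, PySem.List.enumerate_nil]
    | cons y lb =>
      have hmin : min (x :: la).length (y :: lb).length = (min la.length lb.length) + 1 := by
        simp [Nat.succ_min_succ]
      rw [hmin, List.take_succ_cons]
      have hbids : bidsRec c (y :: lb.take (min la.length lb.length)) =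
          (if y = '-' then none else some (c + 1)) ::
            bidsRec (if y ≠ '-' then c + 1 else c) (lb.take (min la.length lb.length)) := by
        by_cases hy : y = '-' <;> simp [bidsRec, hy]
      rw [hbids]
      set c' := if y ≠ '-' then c + 1 else c with hc'
      have htail : List.filter ((fun i => (x :: la).getD i ' ' != '-') ∘ Nat.succ)
            (List.range (min la.length lb.length))
          = List.filter (fun i => la.getD i ' ' != '-') (List.range (min la.length lb.length)) := by
        apply List.filter_congr
        intro i _
        simp [Function.comp, List.getD]
      have hfm : (List.range ((min la.length lb.length) + 1)).filter
            (fun i => (x :: la).getD i ' ' != '-')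
          = (if x = '-' then ([] : List Nat) else [0]) ++
            ((List.range (min la.length lb.length)).filter
              (fun i => la.getD i ' ' != '-')).map Nat.succ := by
        rw [List.range_succ_eq_map, List.filter_cons, List.filter_map, htail]
        by_cases hx : x = '-' <;> simp [hx]
      rw [hfm]
      by_cases hx : x = '-'
      · -- head column dropped by the filter
        rw [if_pos hx, List.nil_append, enumerate_map_succ, List.map_map]
        have hcg : ∀ p ∈ PySem.List.enumerate ((List.range (min la.length lb.length)).filter
              (fun i => la.getD i ' ' != '-')) 0,
            ((fun ki : Int × Nat => (start + ki.1,
                ((if y = '-' then none else some (c + 1)) ::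
                  bidsRec c' (lb.take (min la.length lb.length))).getD ki.2 none))
              ∘ (fun p : Int × Nat => (p.1, p.2.succ))) p
            = (fun ki : Int × Nat =>
                (start + ki.1, (bidsRec c' (lb.take (min la.length lb.length))).getD ki.2 none)) p := by
          intro p _; simp
        rw [List.map_congr_left hcg, ih lb start c']
        simp [specGo, hx, hc']
      · -- head column kept
        rw [if_neg hx, List.singleton_append, PySem.List.enumerate_cons, zero_add,
          enumerate_map_succ, enumerate_shift _ 1, List.map_map, List.map_cons, List.map_map]
        have hcg : ∀ p ∈ PySem.List.enumerate ((List.range (min la.length lb.length)).filter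
              (fun i => la.getD i ' ' != '-')) 0,
            ((fun ki : Int × Nat => (start + ki.1,
                ((if y = '-' then none else some (c + 1)) ::
                  bidsRec c' (lb.take (min la.length lb.length))).getD ki.2 none))
              ∘ ((fun p : Int × Nat => (p.1, p.2.succ)) ∘ (fun p : Int × Nat => (p.1 + 1, p.2)))) p
            = (fun ki : Int × Nat =>
                ((start + 1) + ki.1, (bidsRec c' (lb.take (min la.length lb.length))).getD ki.2 none)) p := by
          intro p _
          simp [Function.comp]
          omega
        rw [List.map_congr_left hcg, ih lb (start + 1) c']
        by_cases hy : y = '-' <;> simp [specGo, hx, hy, hc']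

-- A's fold appends exactly specGo to the dict's items, as long as every existing key is ≤ sa
theorem Afold_items (ps : List (Char × Char)) (d : PySem.Dict Int (Option Int)) (sa sb : Int)
    (hk : ∀ k ∈ d.keys, k ≤ sa) :
    ((ps.foldl createStep (d, sa, sb)).1).items = d.items ++ specGo ps (sa + 1) sb := by
  induction ps generalizing d sa sb with
  | nil => simp [specGo]
  | cons xy ps ih =>
    obtain ⟨x, y⟩ := xy
    rw [List.foldl_cons]
    have hnc : d.contains (sa + 1) = false := by
      cases hcc : d.contains (sa + 1) with
      | false => rfl
      | true =>
        have hm : (sa + 1) ∈ d.keys := (PySem.Dict.contains_iff_mem_keys d (sa + 1)).1 hcc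
        have := hk _ hm
        omega
    by_cases hx : x = '-'
    · have hstep : createStep (d, sa, sb) (x, y) = (d, sa, if y ≠ '-' then sb + 1 else sb) := by
        simp [createStep, hx]
      rw [hstep, ih d sa _ hk]
      by_cases hy : y = '-' <;> simp [specGo, hx, hy]
    · by_cases hy : y = '-'
      · have hstep : createStep (d, sa, sb) (x, y) = (d.insert (sa + 1) none, sa + 1, sb) := by
          simp [createStep, hx, hy]
        rw [hstep, ih (d.insert (sa + 1) none) (sa + 1) sb (by
          intro k hkm
          rcases (PySem.Dict.mem_keys_insert d (sa + 1) k none).1 hkm with h | h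
          · omega
          · have := hk _ h; omega)]
        rw [PySem.Dict.items_insert_of_not_contains _ _ hnc]
        simp [specGo, hx, hy]
      · have hstep : createStep (d, sa, sb) (x, y)
            = (d.insert (sa + 1) (some (sb + 1)), sa + 1, sb + 1) := by
          simp [createStep, hx, hy]
        rw [hstep, ih (d.insert (sa + 1) (some (sb + 1))) (sa + 1) (sb + 1) (by
          intro k hkm
          rcases (PySem.Dict.mem_keys_insert d (sa + 1) k (some (sb + 1))).1 hkm with h | h
          · omega
          · have := hk _ h; omega)]
        rw [PySem.Dict.items_insert_of_not_contains _ _ hnc]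
        simp [specGo, hx, hy]

-- ===== VERDICT (by name: the statement is the Claim_ definition above) =====
theorem create_id_mapping_spec : Claim_equal_create_id_mapping := by
  intro a b s _
  unfold Spec_create_id_mapping
  simp only [create_id_mapping, create_id_mapping_alt]
  rw [Afold_items (a.toList.zip b.toList) PySem.Dict.empty (s - 1) 0
    (by simp [PySem.Dict.keys_empty])]
  rw [bids_foldl]
  have hs : s - 1 + 1 = s := by ring
  rw [hs]
  have hempty : (PySem.Dict.empty : PySem.Dict Int (Option Int)).items = [] := rfl
  rw [hempty, List.nil_append, List.nil_append]
  rw [altGo_eq_spec a.toList b.toList s 0]
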